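-- pv_equiv track=rewrite | github.com/P1Analytics/Centrality-Analysis-for-Twitter-Network | betweenness_centrality.py | find_r
-- ===== SOURCE A (Python) =====
-- import queue
-- from collections import defaultdict
--
-- def find_r(graph,source):
--     Q = queue.Queue()  # FIFO
--     S = []  # list as stack : LIFO
--     distance = defaultdict(lambda:-1)
--     distance[source] = 0
--     sigma = defaultdict(lambda: 0) # number of paths through this node
--     sigma[source] = 1
--     Q.put(source)
--
--     while not Q.empty():
--         v = Q.get()
--         if v in S:  # stop back to the visited node
--             continue
--         S.append(v)
--         for w in graph.get(v, []):
--             if distance[w] < 0: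
--                 Q.put(w)
--                 distance[w] = distance[v] + 1
--             if distance[w] == distance[v] + 1:
--                 sigma[w] += sigma[v]
--     return sorted(list(sigma.values()))[-2:]
-- ===== SOURCE B (Python) =====
-- def find_r(graph, source):
--     # pass 1: plain BFS that only labels distances, scanning the growing
--     # discovery list by index (no queue object, no visited stack)
--     dist = {source: 0}
--     order = [source]
--     i = 0
--     while i < len(order):
--         v = order[i]
--         i += 1
--         for w in graph.get(v, []):
--             if w not in dist:
--                 dist[w] = dist[v] + 1
--                 order.append(w)
--     # pass 2: separate dynamic-programming sweep over the discovery order,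
--     # pushing path counts along edges that advance the distance by one
--     sigma = {v: 0 for v in order}
--     sigma[source] = 1
--     for v in order:
--         for w in graph.get(v, []):
--             if dist[w] == dist[v] + 1:
--                 sigma[w] += sigma[v]
--     return sorted(sigma.values())[-2:]
-- ===== Notes on version B (the rewrite author's own statement) =====
-- stated objective: alternative
-- what changed: Replaced A's single interleaved queue-BFS (queue.Queue, visited stack with linear 'v in S' scans, defaultdicts updating distance and sigma together) by two separate passes: an index-scanned BFS that only labels distances and records the discovery order, then a distinct dynamic-programming sweep over that order that accumulates path counts along distance-increasing edges.
import Mathlib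
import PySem

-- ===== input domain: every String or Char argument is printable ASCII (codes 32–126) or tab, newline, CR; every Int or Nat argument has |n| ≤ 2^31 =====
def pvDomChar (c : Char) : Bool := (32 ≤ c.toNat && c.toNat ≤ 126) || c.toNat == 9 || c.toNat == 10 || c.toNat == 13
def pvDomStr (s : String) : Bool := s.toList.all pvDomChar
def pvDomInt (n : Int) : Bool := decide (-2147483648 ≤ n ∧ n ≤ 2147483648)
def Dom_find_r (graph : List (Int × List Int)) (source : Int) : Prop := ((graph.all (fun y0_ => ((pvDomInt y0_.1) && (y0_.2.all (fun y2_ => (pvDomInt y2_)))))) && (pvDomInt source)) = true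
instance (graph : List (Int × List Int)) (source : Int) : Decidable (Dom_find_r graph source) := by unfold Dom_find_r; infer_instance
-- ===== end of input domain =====

-- B replaces A's single interleaved queue-BFS (queue.Queue + visited stack + defaultdicts) by
-- two separate passes: an index-scanned BFS that only labels distances, then a distinct
-- DP sweep over the discovery order that accumulates the path counts (objective: alternative).

-- ===== PORT A =====
-- One iteration of A's inner `for w in graph.get(v, [])` loop; state = (queue Q, distance, sigma).
-- defaultdict reads are ported as getD with the default (-1 resp. 0): the keys a defaultdict
-- read inserts are never observed (only sigma's values are returned), so values agree exactly.
def stepA (v : Int) (st : List Int × PySem.Dict Int Int × PySem.Dict Int Int) (w : Int) :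
    List Int × PySem.Dict Int Int × PySem.Dict Int Int :=
  let q := if st.2.1.getD w (-1) < 0 then st.1 ++ [w] else st.1
  let dist := if st.2.1.getD w (-1) < 0 then st.2.1.insert w (st.2.1.getD v (-1) + 1) else st.2.1
  let sigma := if dist.getD w (-1) == dist.getD v (-1) + 1
               then st.2.2.insert w (st.2.2.getD w 0 + st.2.2.getD v 0) else st.2.2
  (q, dist, sigma)

-- A's `while not Q.empty()` loop (Q = FIFO list, pop at the head, put at the end; S the visited
-- stack). The Nat fuel is only a totality guard: Q.put fires only when distance[w] < 0, which is
-- immediately set ≥ 0, so each node is enqueued at most once and the fuel passed by find_r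
-- (1 + total number of adjacency entries) always suffices.
def loopA (g : PySem.Dict Int (List Int)) :
    Nat → List Int → List Int → PySem.Dict Int Int → PySem.Dict Int Int → PySem.Dict Int Int
  | 0, _, _, _, sigma => sigma
  | _ + 1, [], _, _, sigma => sigma
  | fuel + 1, v :: q, S, dist, sigma =>
    if S.contains v then loopA g fuel q S dist sigma
    else
      let st := (g.getD v []).foldl (stepA v) (q, dist, sigma)
      loopA g fuel st.1 (S ++ [v]) st.2.1 st.2.2

def find_r (graph : List (Int × List Int)) (source : Int) : List Int :=
  let g : PySem.Dict Int (List Int) := PySem.Dict.mk graph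
  let dist : PySem.Dict Int Int := PySem.Dict.empty.insert source 0   -- distance[source] = 0
  let sigma : PySem.Dict Int Int := PySem.Dict.empty.insert source 1  -- sigma[source] = 1
  let res := loopA g (1 + (graph.map (fun p => p.2.length)).sum) [source] [] dist sigma
  PySem.List.slice (PySem.List.sorted res.values (fun x => x) false) (some (-2)) none

-- ===== PORT B =====
-- Pass 1, inner loop body (`for w in graph.get(v, [])`): state = (pending part of `order`, dist).
-- `dist[v]` is a read of an always-present key; ported as getD — the default is never reached.
def step1 (v : Int) (st : List Int × PySem.Dict Int Int) (w : Int) :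
    List Int × PySem.Dict Int Int :=
  if !st.2.contains w then (st.1 ++ [w], st.2.insert w (st.2.getD v (-1) + 1)) else st

-- Pass 1, the `while i < len(order)` index scan: `done` = order[:i] (already scanned),
-- `pending` = order[i:], returns (order, dist). The Nat fuel is only a totality guard
-- (each node is appended at most once), always sufficient as passed by find_r_alt.
def bfs1 (g : PySem.Dict Int (List Int)) :
    Nat → List Int → List Int → PySem.Dict Int Int → List Int × PySem.Dict Int Int
  | 0, done, pending, dist => (done ++ pending, dist)
  | _ + 1, done, [], dist => (done, dist)
  | fuel + 1, done, v :: pend, dist =>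
    let st := (g.getD v []).foldl (step1 v) (pend, dist)
    bfs1 g fuel (done ++ [v]) st.1 st.2

-- Pass 2, inner loop body: dist keys for v and w are always present after pass 1;
-- reads ported as getD with unreachable defaults.
def step2 (distF : PySem.Dict Int Int) (v : Int) (sigma : PySem.Dict Int Int) (w : Int) :
    PySem.Dict Int Int :=
  if distF.getD w (-1) == distF.getD v (-1) + 1
  then sigma.insert w (sigma.getD w 0 + sigma.getD v 0) else sigma

-- Pass 2, the `for v in order` DP sweep.
def pass2 (g : PySem.Dict Int (List Int)) (distF : PySem.Dict Int Int)
    (order : List Int) (sigma : PySem.Dict Int Int) : PySem.Dict Int Int :=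
  order.foldl (fun s v => (g.getD v []).foldl (step2 distF v) s) sigma

def find_r_alt (graph : List (Int × List Int)) (source : Int) : List Int :=
  let g : PySem.Dict Int (List Int) := PySem.Dict.mk graph
  let r := bfs1 g (1 + (graph.map (fun p => p.2.length)).sum) [] [source]
             (PySem.Dict.empty.insert source 0)                      -- dist = {source: 0}
  let seed := (r.1.foldl (fun (s : PySem.Dict Int Int) v => s.insert v 0)
                 PySem.Dict.empty).insert source 1                   -- {v: 0 for v in order}; [source]=1
  let sigma := pass2 g r.2 r.1 seed
  PySem.List.slice (PySem.List.sorted sigma.values (fun x => x) false) (some (-2)) none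

-- ===== PRECONDITION & SPEC =====
def Spec_find_r (graph : List (Int × List Int)) (source : Int) (out : List Int) : Prop := out = find_r_alt graph source
instance (graph : List (Int × List Int)) (source : Int) (out : List Int) : Decidable (Spec_find_r graph source out) := by unfold Spec_find_r; infer_instance

-- ===== CLAIM (what is proved, stated in full; the proofs are below) =====
def Claim_equal_find_r : Prop := ∀ (graph : List (Int × List Int)) (source : Int), Dom_find_r graph source → Spec_find_r graph source (find_r graph source)

-- ===== LEMMAS AND PROOFS =====

-- All values ever stored in a distance dict are ≥ 0 (so getD _ (-1) < 0 ⟺ the key is absent).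
def DKeys (dist : PySem.Dict Int Int) : Prop :=
  ∀ k : Int, (dist.get? k).isSome → 0 ≤ dist.getD k (-1)

-- d' preserves every entry of d (pass-1 dicts only grow, entries are never overwritten).
def DExt (d d' : PySem.Dict Int Int) : Prop :=
  ∀ k : Int, d.contains k = true → d'.get? k = d.get? k

-- potential: adjacency entries (with multiplicity, over the universe list U) still undiscovered
def Phi (U : List Int) (dist : PySem.Dict Int Int) : Nat :=
  (U.filter (fun w => dist.getD w (-1) < 0)).length

lemma dext_refl (d : PySem.Dict Int Int) : DExt d d := fun _ _ => rfl

lemma dext_trans {d d' d'' : PySem.Dict Int Int} (h1 : DExt d d') (h2 : DExt d' d'') :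
    DExt d d'' := by
  intro k hk
  have e1 := h1 k hk
  have hk' : d'.contains k = true := by
    rw [PySem.Dict.contains_eq_isSome_get?, e1, ← PySem.Dict.contains_eq_isSome_get?]
    exact hk
  rw [h2 k hk', e1]

lemma dext_getD {d d' : PySem.Dict Int Int} (h : DExt d d') (k : Int)
    (hk : d.contains k = true) (x : Int) : d'.getD k x = d.getD k x := by
  rw [PySem.Dict.getD_eq_get?_getD, PySem.Dict.getD_eq_get?_getD, h k hk]

lemma getD_of_contains_true (dist : PySem.Dict Int Int) (w : Int) (hK : DKeys dist)
    (hc : dist.contains w = true) : 0 ≤ dist.getD w (-1) := by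
  apply hK
  rw [PySem.Dict.contains_eq_isSome_get?] at hc
  exact hc

lemma contains_of_getD_nonneg (dist : PySem.Dict Int Int) (w : Int)
    (h : 0 ≤ dist.getD w (-1)) : dist.contains w = true := by
  by_contra hc
  rw [Bool.not_eq_true] at hc
  rw [PySem.Dict.getD_of_not_contains dist (-1) hc] at h
  omega

lemma adj_mem (graph : List (Int × List Int)) (v w : Int)
    (h : w ∈ (PySem.Dict.mk graph).getD v []) : w ∈ graph.flatMap Prod.snd := by
  induction graph with
  | nil =>
    rw [PySem.Dict.getD_eq_get?_getD] at h
    rw [show ({ items := [] } : PySem.Dict Int (List Int)) = PySem.Dict.empty from rfl,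
        PySem.Dict.get?_empty] at h
    simp at h
  | cons p rest ih =>
    rw [PySem.Dict.getD_eq_get?_getD] at h
    rw [show (PySem.Dict.mk (p :: rest)) = PySem.Dict.mk ((p.1, p.2) :: rest) by rfl] at h
    rw [PySem.Dict.get?_mk_cons] at h
    rw [List.flatMap_cons]
    by_cases hc : (p.1 == v) = true
    · simp only [hc, if_pos, Option.getD_some] at h
      exact List.mem_append_left _ h
    · rw [if_neg hc] at h
      refine List.mem_append_right _ (ih ?_)
      rw [PySem.Dict.getD_eq_get?_getD]
      exact h

lemma filter_succ_le (l : List Int) (w : Int) (p q : Int → Bool) (hw : w ∈ l)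
    (hq : q w = false) (hp : p w = true) (himp : ∀ x, q x = true → p x = true) :
    (l.filter q).length + 1 ≤ (l.filter p).length := by
  induction l with
  | nil => cases hw
  | cons a l ih =>
    rcases List.mem_cons.mp hw with rfl | ha
    · have h1 : (l.filter q).length ≤ (l.filter p).length := by
        exact (List.monotone_filter_right l (fun x hx => himp x hx)).length_le
      simp [hq, hp]
      omega
    · have := ih ha
      by_cases hqa : q a = true
      · simp [hqa, himp a hqa]; omega
      · simp only [List.filter_cons]
        rw [Bool.not_eq_true] at hqa
        by_cases hpa : p a = true <;> simp [hqa, hpa] <;> omega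

-- Pass-1 folds only grow the distance dict.
lemma step1_mono (v : Int) : ∀ (nbrs q : List Int) (dist : PySem.Dict Int Int),
    DExt dist (nbrs.foldl (step1 v) (q, dist)).2 := by
  intro nbrs
  induction nbrs with
  | nil => intro q dist; exact dext_refl dist
  | cons w nbrs ih =>
    intro q dist
    rw [List.foldl_cons]
    by_cases hc : dist.contains w = true
    · rw [show step1 v (q, dist) w = (q, dist) by simp [step1, hc]]
      exact ih q dist
    · rw [Bool.not_eq_true] at hc
      rw [show step1 v (q, dist) w
            = (q ++ [w], dist.insert w (dist.getD v (-1) + 1)) by simp [step1, hc]]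
      refine dext_trans ?_ (ih (q ++ [w]) (dist.insert w (dist.getD v (-1) + 1)))
      intro k hk
      have hkw : k ≠ w := by rintro rfl; rw [hk] at hc; cases hc
      rw [PySem.Dict.get?_insert]
      simp [hkw]

-- A's inner loop vs B's pass-1 inner loop: the queue/dist components coincide, and all
-- structural invariants are maintained.  D = already-visited nodes ++ [v].
lemma innerQ (U : List Int) (v : Int) (D : List Int) :
    ∀ (nbrs q : List Int) (dist σ : PySem.Dict Int Int),
    (∀ w ∈ nbrs, w ∈ U) →
    (D ++ q).Nodup →
    (∀ k, dist.contains k = true ↔ k ∈ D ++ q) →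
    DKeys dist →
    0 ≤ dist.getD v (-1) →
    (∀ k, σ.contains k = dist.contains k) →
    σ.keys.Nodup →
    (nbrs.foldl (stepA v) (q, dist, σ)).1 = (nbrs.foldl (step1 v) (q, dist)).1 ∧
    (nbrs.foldl (stepA v) (q, dist, σ)).2.1 = (nbrs.foldl (step1 v) (q, dist)).2 ∧
    (∃ news, (nbrs.foldl (step1 v) (q, dist)).1 = q ++ news) ∧
    (D ++ (nbrs.foldl (step1 v) (q, dist)).1).Nodup ∧
    (∀ k, (nbrs.foldl (step1 v) (q, dist)).2.contains k = true ↔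
       k ∈ D ++ (nbrs.foldl (step1 v) (q, dist)).1) ∧
    DKeys (nbrs.foldl (step1 v) (q, dist)).2 ∧
    0 ≤ (nbrs.foldl (step1 v) (q, dist)).2.getD v (-1) ∧
    (∀ k, (nbrs.foldl (stepA v) (q, dist, σ)).2.2.contains k =
       (nbrs.foldl (step1 v) (q, dist)).2.contains k) ∧
    (nbrs.foldl (stepA v) (q, dist, σ)).2.2.keys.Nodup ∧
    (nbrs.foldl (step1 v) (q, dist)).1.length + Phi U (nbrs.foldl (step1 v) (q, dist)).2
      ≤ q.length + Phi U dist := by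
  intro nbrs
  induction nbrs with
  | nil =>
    intro q dist σ _ h1 h2 h3 hv h4 h5
    exact ⟨rfl, rfl, ⟨[], by simp⟩, h1, h2, h3, hv, h4, h5, le_refl _⟩
  | cons w nbrs ih =>
    intro q dist σ hU h1 h2 h3 hv h4 h5
    have hUrest : ∀ x ∈ nbrs, x ∈ U := fun x hx => hU x (List.mem_cons_of_mem _ hx)
    by_cases hc : dist.contains w = true
    · -- already discovered: queue and dist unchanged on both sides
      have hge : 0 ≤ dist.getD w (-1) := getD_of_contains_true dist w h3 hc
      have hA : stepA v (q, dist, σ) w =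
          (q, dist, if dist.getD w (-1) == dist.getD v (-1) + 1
             then σ.insert w (σ.getD w 0 + σ.getD v 0) else σ) := by
        simp only [stepA]
        simp [show ¬ dist.getD w (-1) < 0 by omega]
      have hB : step1 v (q, dist) w = (q, dist) := by simp [step1, hc]
      rw [List.foldl_cons, List.foldl_cons, hA, hB]
      have h4' : ∀ k, (if dist.getD w (-1) == dist.getD v (-1) + 1
            then σ.insert w (σ.getD w 0 + σ.getD v 0) else σ).contains k = dist.contains k := by
        intro k
        split
        · rw [PySem.Dict.contains_insert]
          by_cases hkw : k = w
          · subst hkw; simp [hc]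
          · simp [hkw, h4 k]
        · exact h4 k
      have h5' : (if dist.getD w (-1) == dist.getD v (-1) + 1
            then σ.insert w (σ.getD w 0 + σ.getD v 0) else σ).keys.Nodup := by
        split
        · exact PySem.Dict.nodup_keys_insert _ _ _ h5
        · exact h5
      exact ih q dist _ hUrest h1 h2 h3 hv h4' h5'
    · -- fresh node: both sides append w and set its distance
      rw [Bool.not_eq_true] at hc
      have hn : dist.getD w (-1) = -1 := PySem.Dict.getD_of_not_contains dist (-1) hc
      set dv := dist.getD v (-1) with hdv
      set d' := dist.insert w (dv + 1) with hd'
      have hvw : v ≠ w := by intro h; rw [hdv, h, hn] at hv; omega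
      have hgw : d'.getD w (-1) = dv + 1 := by rw [hd', PySem.Dict.getD_insert]; simp
      have hgo : ∀ x : Int, x ≠ w → d'.getD x (-1) = dist.getD x (-1) := by
        intro x hx; rw [hd', PySem.Dict.getD_insert]; simp [hx]
      have hwnotin : w ∉ D ++ q := fun h => by rw [← h2 w] at h; rw [h] at hc; cases hc
      have hlt : dist.getD w (-1) < 0 := by omega
      have hcond : (d'.getD w (-1) == d'.getD v (-1) + 1) = true := by
        rw [hgw, hgo v hvw, ← hdv]; simp
      have hA : stepA v (q, dist, σ) w =
          (q ++ [w], d', σ.insert w (σ.getD w 0 + σ.getD v 0)) := by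
        simp only [stepA, if_pos hlt]
        rw [← hdv, ← hd', if_pos hcond]
      have hB : step1 v (q, dist) w = (q ++ [w], d') := by
        simp [step1, hc, ← hdv, ← hd']
      rw [List.foldl_cons, List.foldl_cons, hA, hB]
      have h1' : (D ++ (q ++ [w])).Nodup := by
        rw [← List.append_assoc]
        refine List.Nodup.append h1 (List.nodup_singleton w) ?_
        intro x hx hx'
        rw [List.mem_singleton] at hx'
        exact hwnotin (hx' ▸ hx)
      have h2' : ∀ k, d'.contains k = true ↔ k ∈ D ++ (q ++ [w]) := by
        intro k
        rw [hd', PySem.Dict.contains_insert, ← List.append_assoc]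
        by_cases hkw : k = w
        · subst hkw; simp
        · simp [hkw, h2 k]
      have h3' : DKeys d' := by
        intro k hk
        by_cases hkw : k = w
        · subst hkw; rw [hgw]; omega
        · rw [hgo k hkw]
          apply h3
          rw [hd', PySem.Dict.get?_insert] at hk
          simpa [hkw] using hk
      have hv' : 0 ≤ d'.getD v (-1) := by rw [hgo v hvw, ← hdv]; exact hv
      have h4' : ∀ k, (σ.insert w (σ.getD w 0 + σ.getD v 0)).contains k = d'.contains k := by
        intro k
        rw [PySem.Dict.contains_insert, hd', PySem.Dict.contains_insert, h4 k]
      have h5' : (σ.insert w (σ.getD w 0 + σ.getD v 0)).keys.Nodup :=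
        PySem.Dict.nodup_keys_insert _ _ _ h5
      have hrec := ih (q ++ [w]) d' _ hUrest h1' h2' h3' hv' h4' h5'
      obtain ⟨e1, e2, ⟨news, hnews⟩, r4, r5, r6, r7, r8, r9, r10⟩ := hrec
      refine ⟨e1, e2, ⟨w :: news, by rw [hnews]; simp⟩, r4, r5, r6, r7, r8, r9, ?_⟩
      have hphi : Phi U d' + 1 ≤ Phi U dist := by
        apply filter_succ_le _ w _ _ (hU w List.mem_cons_self)
        · simp only [decide_eq_false_iff_not, not_lt]
          rw [hgw]; omega
        · simp only [decide_eq_true_eq]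
          rw [hn]; omega
        · intro x hx
          simp only [decide_eq_true_eq] at hx ⊢
          by_cases hxw : x = w
          · subst hxw; rw [hgw] at hx; omega
          · rw [hgo x hxw] at hx; exact hx
      simp only [List.length_append, List.length_singleton] at r10 ⊢
      omega

-- A's sigma updates at node v vs B's pass-2 updates at node v: pointwise value agreement,
-- given that the final distance dict distF extends the running one.
lemma innerSigma (v : Int) (distF : PySem.Dict Int Int) :
    ∀ (nbrs q : List Int) (dist σA σB : PySem.Dict Int Int),
    DKeys dist →
    0 ≤ dist.getD v (-1) →
    DExt (nbrs.foldl (step1 v) (q, dist)).2 distF →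
    (∀ k, σA.getD k 0 = σB.getD k 0) →
    ∀ k, (nbrs.foldl (stepA v) (q, dist, σA)).2.2.getD k 0
         = (nbrs.foldl (step2 distF v) σB).getD k 0 := by
  intro nbrs
  induction nbrs with
  | nil => intro q dist σA σB _ _ _ hcorr k; exact hcorr k
  | cons w nbrs ih =>
    intro q dist σA σB h3 hv hExt hcorr
    have hvc : dist.contains v = true := contains_of_getD_nonneg dist v hv
    have hcur : DExt dist distF := dext_trans (step1_mono v (w :: nbrs) q dist) hExt
    have hFv : distF.getD v (-1) = dist.getD v (-1) := dext_getD hcur v hvc (-1)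
    by_cases hc : dist.contains w = true
    · have hge : 0 ≤ dist.getD w (-1) := getD_of_contains_true dist w h3 hc
      have hFw : distF.getD w (-1) = dist.getD w (-1) := dext_getD hcur w hc (-1)
      have hA : stepA v (q, dist, σA) w =
          (q, dist, if dist.getD w (-1) == dist.getD v (-1) + 1
             then σA.insert w (σA.getD w 0 + σA.getD v 0) else σA) := by
        simp only [stepA]
        simp [show ¬ dist.getD w (-1) < 0 by omega]
      have hB1 : step1 v (q, dist) w = (q, dist) := by simp [step1, hc]
      have hB2 : step2 distF v σB w =
          (if dist.getD w (-1) == dist.getD v (-1) + 1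
           then σB.insert w (σB.getD w 0 + σB.getD v 0) else σB) := by
        simp only [step2, hFw, hFv]
      rw [List.foldl_cons, List.foldl_cons, hA, hB2]
      have hExt' : DExt (nbrs.foldl (step1 v) (q, dist)).2 distF := by
        rw [List.foldl_cons, hB1] at hExt; exact hExt
      apply ih q dist _ _ h3 hv hExt'
      intro k
      split
      · rw [PySem.Dict.getD_insert, PySem.Dict.getD_insert]
        by_cases hkw : k = w
        · simp [hkw, hcorr w, hcorr v]
        · simp [hkw, hcorr k]
      · exact hcorr k
    · rw [Bool.not_eq_true] at hc
      have hn : dist.getD w (-1) = -1 := PySem.Dict.getD_of_not_contains dist (-1) hc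
      set dv := dist.getD v (-1) with hdv
      set d' := dist.insert w (dv + 1) with hd'
      have hvw : v ≠ w := by intro h; rw [hdv, h, hn] at hv; omega
      have hgw : d'.getD w (-1) = dv + 1 := by rw [hd', PySem.Dict.getD_insert]; simp
      have hgv : d'.getD v (-1) = dv := by
        rw [hd', PySem.Dict.getD_insert]; simp [hvw]; rw [hdv]
      have hlt : dist.getD w (-1) < 0 := by omega
      have hcond : (d'.getD w (-1) == d'.getD v (-1) + 1) = true := by
        rw [hgw, hgv]; simp
      have hA : stepA v (q, dist, σA) w =
          (q ++ [w], d', σA.insert w (σA.getD w 0 + σA.getD v 0)) := by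
        simp only [stepA, if_pos hlt]
        rw [← hdv, ← hd', if_pos hcond]
      have hExt' : DExt (nbrs.foldl (step1 v) (q ++ [w], d')).2 distF := by
        rw [List.foldl_cons, show step1 v (q, dist) w = (q ++ [w], d') by
          simp [step1, hc, ← hdv, ← hd']] at hExt
        exact hExt
      have hwc' : d'.contains w = true := by
        rw [hd', PySem.Dict.contains_insert]; simp
      have hcur' : DExt d' distF := dext_trans (step1_mono v nbrs (q ++ [w]) d') hExt'
      have hFw : distF.getD w (-1) = dv + 1 := by rw [dext_getD hcur' w hwc' (-1), hgw]
      have hFcond : (distF.getD w (-1) == distF.getD v (-1) + 1) = true := by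
        rw [hFw, hFv]; simp
      have hB2 : step2 distF v σB w = σB.insert w (σB.getD w 0 + σB.getD v 0) := by
        simp only [step2, if_pos hFcond]
      have h3' : DKeys d' := by
        intro k hk
        by_cases hkw : k = w
        · subst hkw; rw [hgw]; omega
        · rw [hd', PySem.Dict.getD_insert, if_neg hkw]
          apply h3
          rw [hd', PySem.Dict.get?_insert] at hk
          simpa [hkw] using hk
      have hv' : 0 ≤ d'.getD v (-1) := by rw [hgv]; exact hv
      rw [List.foldl_cons, List.foldl_cons, hA, hB2]
      apply ih (q ++ [w]) d' _ _ h3' hv' hExt'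
      intro k
      rw [PySem.Dict.getD_insert, PySem.Dict.getD_insert]
      by_cases hkw : k = w
      · simp [hkw, hcorr w, hcorr v]
      · simp [hkw, hcorr k]

-- prepending to the `done` accumulator of bfs1 just prepends to the returned order
lemma bfs1_shift (g : PySem.Dict Int (List Int)) :
    ∀ (fuel : Nat) (d1 d2 pending : List Int) (dist : PySem.Dict Int Int),
    bfs1 g fuel (d1 ++ d2) pending dist
      = (d1 ++ (bfs1 g fuel d2 pending dist).1, (bfs1 g fuel d2 pending dist).2) := by
  intro fuel
  induction fuel with
  | zero => intro d1 d2 pending dist; simp [bfs1]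
  | succ fuel ih =>
    intro d1 d2 pending dist
    match pending with
    | [] => simp [bfs1]
    | v :: pend =>
      show bfs1 g fuel ((d1 ++ d2) ++ [v]) _ _ = _
      rw [List.append_assoc, ih]
      rfl

-- Main simulation: A's interleaved loop computes the same sigma values as B's pass 1
-- followed by B's pass 2, and the key sets coincide.
lemma main_sim (g : PySem.Dict Int (List Int)) (U : List Int)
    (hg : ∀ v : Int, ∀ w ∈ g.getD v [], w ∈ U) :
    ∀ (fuel : Nat) (pending done : List Int) (dist σA : PySem.Dict Int Int),
    (done ++ pending).Nodup →
    (∀ k, dist.contains k = true ↔ k ∈ done ++ pending) →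
    DKeys dist →
    (∀ k, σA.contains k = dist.contains k) →
    σA.keys.Nodup →
    pending.length + Phi U dist ≤ fuel →
    (∃ rest, (bfs1 g fuel [] pending dist).1 = pending ++ rest) ∧
    (done ++ (bfs1 g fuel [] pending dist).1).Nodup ∧
    (∀ k, (bfs1 g fuel [] pending dist).2.contains k = true ↔
       k ∈ done ++ (bfs1 g fuel [] pending dist).1) ∧
    DKeys (bfs1 g fuel [] pending dist).2 ∧
    DExt dist (bfs1 g fuel [] pending dist).2 ∧
    (∀ k, (loopA g fuel pending done dist σA).contains k
        = (bfs1 g fuel [] pending dist).2.contains k) ∧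
    (loopA g fuel pending done dist σA).keys.Nodup ∧
    (∀ σB, (∀ k, σA.getD k 0 = σB.getD k 0) →
       ∀ k, (loopA g fuel pending done dist σA).getD k 0
          = (pass2 g (bfs1 g fuel [] pending dist).2 (bfs1 g fuel [] pending dist).1 σB).getD k 0) := by
  intro fuel
  induction fuel with
  | zero =>
    intro pending done dist σA h1 h2 h3 h4 h5 h6
    have hp : pending = [] := by
      cases pending with
      | nil => rfl
      | cons a l => simp at h6
    subst hp
    exact ⟨⟨[], rfl⟩, h1, h2, h3, dext_refl dist, h4, h5, fun σB hcorr k => hcorr k⟩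
  | succ fuel ih =>
    intro pending done dist σA h1 h2 h3 h4 h5 h6
    match pending with
    | [] =>
      exact ⟨⟨[], rfl⟩, h1, h2, h3, dext_refl dist, h4, h5, fun σB hcorr k => hcorr k⟩
    | v :: q =>
      have hre : done ++ v :: q = (done ++ [v]) ++ q := by simp
      have hvD : v ∈ done ++ v :: q := by simp
      have hvc : dist.contains v = true := (h2 v).mpr hvD
      have hv : 0 ≤ dist.getD v (-1) := getD_of_contains_true dist v h3 hvc
      have hnotin : v ∉ done := by
        intro hmem
        exact (List.disjoint_of_nodup_append h1) hmem List.mem_cons_self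
      obtain ⟨e1, e2, ⟨news, hnews⟩, c4, c5, c6, c7, c8, c9, c10⟩ :=
        innerQ U v (done ++ [v]) (g.getD v []) q dist σA (hg v)
          (by rw [← hre]; exact h1) (fun k => by rw [← hre]; exact h2 k) h3 hv h4 h5
      set b1 := ((g.getD v []).foldl (step1 v) (q, dist)).1 with hb1
      set b2 := ((g.getD v []).foldl (step1 v) (q, dist)).2 with hb2
      set σA' := ((g.getD v []).foldl (stepA v) (q, dist, σA)).2.2 with hσA'
      have hmono : DExt dist b2 := step1_mono v (g.getD v []) q dist
      have h6' : b1.length + Phi U b2 ≤ fuel := by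
        simp only [List.length_cons] at h6
        omega
      obtain ⟨⟨r', hr'⟩, i2, i3, i4, i5, i6, i7, i8⟩ :=
        ih b1 (done ++ [v]) b2 σA' c4 c5 c6 c8 c9 h6'
      have hAstep : loopA g (fuel + 1) (v :: q) done dist σA
          = loopA g fuel b1 (done ++ [v]) b2 σA' := by
        rw [loopA, if_neg (by simpa using hnotin)]
        show loopA g fuel ((g.getD v []).foldl (stepA v) (q, dist, σA)).1 (done ++ [v])
          ((g.getD v []).foldl (stepA v) (q, dist, σA)).2.1
          ((g.getD v []).foldl (stepA v) (q, dist, σA)).2.2 = _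
        rw [e1, e2]
      have hBstep : bfs1 g (fuel + 1) [] (v :: q) dist
          = (v :: (bfs1 g fuel [] b1 b2).1, (bfs1 g fuel [] b1 b2).2) := by
        show bfs1 g fuel ([] ++ [v]) _ _ = _
        rw [show ([] ++ [v] : List Int) = [v] ++ [] by simp, bfs1_shift]
        rw [hb1, hb2]
        rfl
      rw [hAstep, hBstep]
      refine ⟨⟨news ++ r', by rw [hr', hnews]; simp⟩, ?_, ?_, i4, ?_, i6, i7, ?_⟩
      · rw [show done ++ v :: (bfs1 g fuel [] b1 b2).1
            = (done ++ [v]) ++ (bfs1 g fuel [] b1 b2).1 by simp]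
        exact i2
      · intro k
        rw [show done ++ v :: (bfs1 g fuel [] b1 b2).1
            = (done ++ [v]) ++ (bfs1 g fuel [] b1 b2).1 by simp]
        exact i3 k
      · exact dext_trans hmono i5
      · intro σB hcorr k
        have hσB' := innerSigma v (bfs1 g fuel [] b1 b2).2 (g.getD v []) q dist σA σB
          h3 hv (by rw [← hb2]; exact i5) hcorr
        have := i8 ((g.getD v []).foldl (step2 (bfs1 g fuel [] b1 b2).2 v) σB)
          (fun k' => by rw [hσA']; exact hσB' k') k
        rw [this]
        rfl

-- pass 2 never creates keys (every inserted key already carries a distance, hence a seed entry)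
lemma pass2_contains (g : PySem.Dict Int (List Int)) (distF : PySem.Dict Int Int)
    (hF : DKeys distF) :
    ∀ (order : List Int) (σ : PySem.Dict Int Int),
    (∀ k, distF.contains k = true → σ.contains k = true) →
    (∀ k, (pass2 g distF order σ).contains k = σ.contains k) ∧
    (σ.keys.Nodup → (pass2 g distF order σ).keys.Nodup) := by
  have inner : ∀ (v : Int) (nbrs : List Int) (σ : PySem.Dict Int Int),
      (∀ k, distF.contains k = true → σ.contains k = true) →
      (∀ k, (nbrs.foldl (step2 distF v) σ).contains k = σ.contains k) ∧
      (σ.keys.Nodup → (nbrs.foldl (step2 distF v) σ).keys.Nodup) := by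
    intro v nbrs
    induction nbrs with
    | nil => intro σ _; exact ⟨fun _ => rfl, fun h => h⟩
    | cons w nbrs ih =>
      intro σ hσ
      rw [List.foldl_cons]
      by_cases hc : (distF.getD w (-1) == distF.getD v (-1) + 1) = true
      · have hw : distF.contains w = true := by
          apply contains_of_getD_nonneg
          have := of_decide_eq_true hc
          have hv1 : -1 ≤ distF.getD v (-1) := by
            by_cases hvc : distF.contains v = true
            · have := getD_of_contains_true distF v hF hvc; omega
            · rw [Bool.not_eq_true] at hvc
              rw [PySem.Dict.getD_of_not_contains distF (-1) hvc]
          omega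
        have hσw : σ.contains w = true := hσ w hw
        rw [show step2 distF v σ w = σ.insert w (σ.getD w 0 + σ.getD v 0) by
          simp [step2]; intro h; rw [beq_iff_eq] at hc; exact absurd hc h]
        have hcont : ∀ k, (σ.insert w (σ.getD w 0 + σ.getD v 0)).contains k = σ.contains k := by
          intro k
          rw [PySem.Dict.contains_insert]
          by_cases hkw : k = w
          · subst hkw; simp [hσw]
          · simp [hkw]
        have := ih (σ.insert w (σ.getD w 0 + σ.getD v 0))
          (fun k hk => by rw [hcont k]; exact hσ k hk)
        refine ⟨fun k => by rw [this.1 k, hcont k], fun hnd => this.2 ?_⟩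
        exact PySem.Dict.nodup_keys_insert _ _ _ hnd
      · rw [show step2 distF v σ w = σ by simp [step2]; intro h; rw [h] at hc; simp at hc]
        exact ih σ hσ
  intro order
  induction order with
  | nil => intro σ _; exact ⟨fun _ => rfl, fun h => h⟩
  | cons v order ih =>
    intro σ hσ
    have h1 := inner v (g.getD v []) σ hσ
    have h2 := ih ((g.getD v []).foldl (step2 distF v) σ)
      (fun k hk => by rw [h1.1 k]; exact hσ k hk)
    exact ⟨fun k => by rw [show pass2 g distF (v :: order) σ
          = pass2 g distF order ((g.getD v []).foldl (step2 distF v) σ) from rfl,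
        h2.1 k, h1.1 k],
      fun hnd => h2.2 (h1.2 hnd)⟩

-- the zero-seeding fold: membership and values
lemma contains_foldl_insert0 :
    ∀ (l : List Int) (d : PySem.Dict Int Int) (k : Int),
    (l.foldl (fun (s : PySem.Dict Int Int) v => s.insert v 0) d).contains k = true ↔
      d.contains k = true ∨ k ∈ l := by
  intro l
  induction l with
  | nil => intro d k; simp
  | cons v l ih =>
    intro d k
    rw [List.foldl_cons, ih]
    rw [PySem.Dict.contains_insert]
    by_cases hkv : k = v <;> simp [hkv]

lemma getD_foldl_insert0 :
    ∀ (l : List Int) (d : PySem.Dict Int Int) (k : Int), d.getD k 0 = 0 →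
    (l.foldl (fun (s : PySem.Dict Int Int) v => s.insert v 0) d).getD k 0 = 0 := by
  intro l
  induction l with
  | nil => intro d k h; exact h
  | cons v l ih =>
    intro d k h
    rw [List.foldl_cons]
    apply ih
    rw [PySem.Dict.getD_insert]
    by_cases hkv : k = v <;> simp [hkv, h]

lemma nodup_keys_foldl_insert0 :
    ∀ (l : List Int) (d : PySem.Dict Int Int), d.keys.Nodup →
    (l.foldl (fun (s : PySem.Dict Int Int) v => s.insert v 0) d).keys.Nodup := by
  intro l
  induction l with
  | nil => intro d h; exact h
  | cons v l ih =>
    intro d h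
    rw [List.foldl_cons]
    exact ih _ (PySem.Dict.nodup_keys_insert _ _ _ h)

-- ===== VERDICT (by name: the statement is the Claim_ definition above) =====
theorem find_r_spec : Claim_equal_find_r := by
  unfold Claim_equal_find_r Spec_find_r
  intro graph source _
  simp only [find_r, find_r_alt]
  set g := PySem.Dict.mk graph with hg
  set U := graph.flatMap Prod.snd with hU
  set fuel := 1 + (graph.map (fun p => p.2.length)).sum with hfuel
  set dist0 := PySem.Dict.empty.insert source (0 : Int) with hdist0
  set σA0 := PySem.Dict.empty.insert source (1 : Int) with hσA0
  have I1 : (([] : List Int) ++ [source]).Nodup := by simp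
  have I2 : ∀ k, dist0.contains k = true ↔ k ∈ ([] : List Int) ++ [source] := by
    intro k
    rw [hdist0, PySem.Dict.contains_insert]
    simp [PySem.Dict.contains_empty]
  have I3 : DKeys dist0 := by
    intro kk hkk
    rw [hdist0, PySem.Dict.get?_insert] at hkk
    by_cases hks : kk = source
    · subst hks; rw [hdist0, PySem.Dict.getD_insert_self]
    · simp [hks, PySem.Dict.get?_empty] at hkk
  have I4 : ∀ k, σA0.contains k = dist0.contains k := by
    intro k
    rw [hσA0, hdist0, PySem.Dict.contains_insert, PySem.Dict.contains_insert]
  have I5 : σA0.keys.Nodup := by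
    rw [hσA0]
    exact PySem.Dict.nodup_keys_insert _ _ _ PySem.Dict.nodup_keys_empty
  have I6 : ([source] : List Int).length + Phi U dist0 ≤ fuel := by
    have h1 : Phi U dist0 ≤ U.length := List.length_filter_le _ _
    have h2 : U.length = (graph.map (fun p => p.2.length)).sum := by
      rw [hU, List.length_flatMap]
    simp only [List.length_singleton]
    omega
  obtain ⟨⟨rest, hrest⟩, hnd, hcont, hdk, hext, hσcont, hσnd, hM1⟩ :=
    main_sim g U (fun v w hw => adj_mem graph v w hw) fuel [source] [] dist0 σA0
      I1 I2 I3 I4 I5 I6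
  set R1 := (bfs1 g fuel [] [source] dist0).1 with hR1
  set R2 := (bfs1 g fuel [] [source] dist0).2 with hR2
  set σB0 := (R1.foldl (fun (s : PySem.Dict Int Int) v => s.insert v 0)
      PySem.Dict.empty).insert source 1 with hσB0
  set σfinA := loopA g fuel [source] [] dist0 σA0 with hσfinA
  set σfinB := pass2 g R2 R1 σB0 with hσfinB
  have hsrc : source ∈ R1 := by rw [hrest]; simp
  have corr0 : ∀ k, σA0.getD k 0 = σB0.getD k 0 := by
    intro k
    by_cases hks : k = source
    · subst hks
      rw [hσA0, hσB0, PySem.Dict.getD_insert_self, PySem.Dict.getD_insert_self]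
    · rw [hσA0, hσB0, PySem.Dict.getD_insert, if_neg hks, PySem.Dict.getD_insert, if_neg hks,
        PySem.Dict.getD_empty]
      rw [getD_foldl_insert0 R1 PySem.Dict.empty k (PySem.Dict.getD_empty _ _)]
  have hvals : ∀ k, σfinA.getD k 0 = σfinB.getD k 0 := hM1 σB0 corr0
  have hseedcont : ∀ k, σB0.contains k = true ↔ k ∈ R1 := by
    intro k
    rw [hσB0, PySem.Dict.contains_insert]
    by_cases hks : k = source
    · subst hks; simp [hsrc]
    · have hf := contains_foldl_insert0 R1 PySem.Dict.empty k
      simp only [show (k == source) = false by simp [hks], Bool.false_or]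
      rw [hf]
      simp [PySem.Dict.contains_empty]
  have hpass := pass2_contains g R2 hdk R1 σB0
    (fun k hk => (hseedcont k).mpr (by simpa using (hcont k).mp hk))
  have hBcont : ∀ k, σfinB.contains k = true ↔ k ∈ R1 := by
    intro k
    rw [hσfinB, hpass.1 k]
    exact hseedcont k
  have hAcont : ∀ k, σfinA.contains k = true ↔ k ∈ R1 := by
    intro k
    rw [hσfinA, hσcont k]
    simpa using hcont k
  have hBnd : σfinB.keys.Nodup := by
    rw [hσfinB]
    exact hpass.2 (PySem.Dict.nodup_keys_insert _ _ _
      (nodup_keys_foldl_insert0 R1 PySem.Dict.empty PySem.Dict.nodup_keys_empty))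
  have hperm : σfinA.keys.Perm σfinB.keys := by
    rw [List.perm_ext_iff_of_nodup hσnd hBnd]
    intro a
    rw [← PySem.Dict.contains_iff_mem_keys, ← PySem.Dict.contains_iff_mem_keys,
      hAcont a, hBcont a]
  have hvperm : σfinA.values.Perm σfinB.values := by
    rw [PySem.Dict.values_eq_map_keys σfinA hσnd 0, PySem.Dict.values_eq_map_keys σfinB hBnd 0,
      show (fun k => σfinA.getD k 0) = (fun k => σfinB.getD k 0) from funext hvals]
    exact hperm.map _
  rw [show PySem.List.sorted σfinA.values (fun x => x) false
      = PySem.List.sorted σfinB.values (fun x => x) false from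
    (PySem.List.sorted_id_eq_sorted_id_iff_perm _ _).mpr hvperm]
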